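-- pv_equiv track=rewrite | github.com/jacksonfellows/euler | python/80_Square_root_digital_expansion.py | find_sqrt_digits
-- ===== SOURCE A (Python) =====
-- def find_sqrt_digits(N, n_digits):
--     c = N                       # assume N < 100
--     p = 0
--     for _ in range(n_digits):
--         x = next(x for x in range(9, -1, -1) if x*(20*p + x) <= c)
--         y = x*(20*p + x)
--         yield x
--         p = 10*p + x
--         c = 100 * (c - y)
-- ===== SOURCE B (Python) =====
-- def find_sqrt_digits(N, n_digits):
--     # Digit-by-digit square root: at each position, count the digit up from 0
--     # by testing whole squares of the root-so-far against the scaled radicand.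
--     p = 0
--     s = N
--     for _ in range(n_digits):
--         x = 0
--         while x < 9 and (10 * p + x + 1) ** 2 <= s:
--             x += 1
--         yield x
--         p = 10 * p + x
--         s *= 100
-- ===== Notes on version B (the rewrite author's own statement) =====
-- stated objective: alternative
-- what changed: Replaces A's descending candidate scan over the long-division remainder (x in 9..0 with x*(20*p+x) <= c, remainder updated as c = 100*(c-y)) by an ascending digit count-up that tests whole squares of the root-so-far against the scaled radicand ((10*p+x+1)**2 <= S with S = N*100**i), keeping no remainder at all; Pre_ excludes only N < 0 with n_digits > 0, where A raises RuntimeError (StopIteration inside next).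
import Mathlib
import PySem

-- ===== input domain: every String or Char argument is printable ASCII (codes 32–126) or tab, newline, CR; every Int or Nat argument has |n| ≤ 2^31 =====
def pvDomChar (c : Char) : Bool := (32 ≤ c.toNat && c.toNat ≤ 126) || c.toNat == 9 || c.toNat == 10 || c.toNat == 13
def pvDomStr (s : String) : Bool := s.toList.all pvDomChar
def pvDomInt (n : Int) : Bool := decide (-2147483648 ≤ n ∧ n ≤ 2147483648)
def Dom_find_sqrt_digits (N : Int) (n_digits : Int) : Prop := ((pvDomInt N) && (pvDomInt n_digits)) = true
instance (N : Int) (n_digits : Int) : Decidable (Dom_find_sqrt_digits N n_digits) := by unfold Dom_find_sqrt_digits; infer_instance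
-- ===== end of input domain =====

-- B replaces A's descending remainder scan by an ascending digit count-up that
-- tests whole squares of the root-so-far against the scaled radicand
-- (objective: alternative algorithm, no remainder bookkeeping).


-- ===== PORT A =====
-- x = next(x for x in range(9, -1, -1) if x*(20*p + x) <= c); the .getD 0 is the
-- StopIteration case (only reachable when c < 0, excluded by Pre_).
def pvStepA (p c : Int) : Int :=
  (((PySem.List.pyRange 9 (-1) (-1)).find? (fun x => decide (x * (20 * p + x) ≤ c))).getD 0)

def pvGoA : Nat → Int → Int → List Int
  | 0, _, _ => []
  | Nat.succ k, c, p =>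
    let x := pvStepA p c
    let y := x * (20 * p + x)
    x :: pvGoA k (100 * (c - y)) (10 * p + x)

def find_sqrt_digits (N : Int) (n_digits : Int) : List Int :=
  pvGoA n_digits.toNat N 0

-- ===== PORT B =====
-- the inner count-up: "x = 0; while x < 9 and (10*p + x + 1)**2 <= s: x += 1"
def pvCount (p s x : Int) : Int :=
  if h : x < 9 ∧ (10 * p + x + 1) ^ 2 ≤ s then pvCount p s (x + 1) else x
  termination_by (9 - x).toNat
  decreasing_by omega

-- the outer "for _ in range(n_digits): … yield x; p = 10*p + x; s *= 100"
def pvGoB : Nat → Int → Int → List Int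
  | 0, _, _ => []
  | Nat.succ k, s, p =>
    let x := pvCount p s 0
    x :: pvGoB k (100 * s) (10 * p + x)

def find_sqrt_digits_alt (N : Int) (n_digits : Int) : List Int :=
  pvGoB n_digits.toNat N 0

-- ===== PRECONDITION & SPEC =====
-- Pre_ excludes only N < 0 with n_digits > 0, where A raises
-- (StopIteration inside next → RuntimeError); A returns on everything else.
def Pre_find_sqrt_digits (N : Int) (n_digits : Int) : Prop := 0 ≤ N ∨ n_digits ≤ 0
instance (N : Int) (n_digits : Int) : Decidable (Pre_find_sqrt_digits N n_digits) := by
  unfold Pre_find_sqrt_digits; infer_instance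

def pvWitness_find_sqrt_digits : Int × Int := (2, 5)

def Spec_find_sqrt_digits (N : Int) (n_digits : Int) (out : List Int) : Prop := out = find_sqrt_digits_alt N n_digits
instance (N : Int) (n_digits : Int) (out : List Int) : Decidable (Spec_find_sqrt_digits N n_digits out) := by unfold Spec_find_sqrt_digits; infer_instance

-- ===== CLAIM (what is proved, stated in full; the proofs are below) =====
def Claim_equal_find_sqrt_digits : Prop := ∀ (N : Int) (n_digits : Int), Dom_find_sqrt_digits N n_digits → Pre_find_sqrt_digits N n_digits → Spec_find_sqrt_digits N n_digits (find_sqrt_digits N n_digits)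

-- ===== LEMMAS AND PROOFS =====

-- integer square root (proof-side abstraction)
def isq (n : Int) : Int := (Nat.sqrt n.toNat : Int)

theorem isq_nonneg (n : Int) : 0 ≤ isq n := by
  unfold isq; positivity

theorem isq_sq_le {n : Int} (hn : 0 ≤ n) : isq n * isq n ≤ n := by
  unfold isq
  have h := Nat.sqrt_le' n.toNat
  have h2 : ((Nat.sqrt n.toNat : Int)) ^ 2 ≤ (n.toNat : Int) := by exact_mod_cast h
  nlinarith [Int.toNat_of_nonneg hn]

theorem lt_succ_isq_sq {n : Int} (hn : 0 ≤ n) : n < (isq n + 1) * (isq n + 1) := by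
  unfold isq
  have h := Nat.lt_succ_sqrt' n.toNat
  nlinarith [Int.toNat_of_nonneg hn]

theorem le_isq {a n : Int} (ha : 0 ≤ a) (h : a * a ≤ n) : a ≤ isq n := by
  by_contra hlt
  push_neg at hlt
  have h2 := lt_succ_isq_sq (le_trans (by nlinarith) h)
  have := isq_nonneg n
  nlinarith

-- A's candidate scan computes min 9 (isq (100 p² + c) − 10 p)
theorem pvStepA_eq {p c : Int} (hp : 0 ≤ p) (hc : 0 ≤ c) :
    pvStepA p c = min 9 (isq (100 * p * p + c) - 10 * p) := by
  have hS : 0 ≤ 100 * p * p + c := by positivity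
  set s := isq (100 * p * p + c) with hs
  have hs0 := isq_nonneg (100 * p * p + c)
  have hps : 10 * p ≤ s := le_isq (by omega) (by nlinarith)
  have key : ∀ x : Int, 0 ≤ x →
      (decide (x * (20 * p + x) ≤ c)) = decide (x ≤ s - 10 * p) := by
    intro x hx
    apply Bool.decide_congr
    constructor
    · intro h
      have : 10 * p + x ≤ s := le_isq (by omega) (by nlinarith)
      omega
    · intro h
      have h1 : (10 * p + x) * (10 * p + x) ≤ s * s := by nlinarith
      have h2 := isq_sq_le hS
      nlinarith
  have hrange : PySem.List.pyRange 9 (-1) (-1) =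
      [9, 8, 7, 6, 5, 4, 3, 2, 1, 0] := by decide
  unfold pvStepA
  rw [hrange]
  simp only [List.find?,
    key 9 (by norm_num), key 8 (by norm_num), key 7 (by norm_num), key 6 (by norm_num),
    key 5 (by norm_num), key 4 (by norm_num), key 3 (by norm_num), key 2 (by norm_num),
    key 1 (by norm_num), key 0 (by norm_num)]
  generalize ht : s - 10 * p = t
  have ht0 : 0 ≤ t := by omega
  by_cases h9 : (9 : Int) ≤ t
  · simp [h9]
  · push_neg at h9
    interval_cases t <;> simp

-- B's count-up computes the same min 9 (isq s − 10 p)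
theorem pvCount_eq {p s : Int} (hp : 0 ≤ p) (hps : 100 * p * p ≤ s) :
    pvCount p s 0 = min 9 (isq s - 10 * p) := by
  have hs : 0 ≤ s := le_trans (by positivity) hps
  have hq := isq_nonneg s
  have h10 : 10 * p ≤ isq s := le_isq (by omega) (by nlinarith)
  set t := min 9 (isq s - 10 * p) with htdef
  have ht0 : 0 ≤ t := by omega
  have key : ∀ x : Int, 0 ≤ x → ((10 * p + x + 1) ^ 2 ≤ s ↔ x + 1 ≤ isq s - 10 * p) := by
    intro x hx
    constructor
    · intro h
      have : 10 * p + x + 1 ≤ isq s := le_isq (by omega) (by nlinarith)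
      omega
    · intro h
      have h1 : (10 * p + x + 1) * (10 * p + x + 1) ≤ isq s * isq s := by nlinarith
      have h2 := isq_sq_le hs
      nlinarith
  suffices hgen : ∀ x : Int, 0 ≤ x → x ≤ t → pvCount p s x = t by
    exact hgen 0 le_rfl ht0
  intro x
  induction x using pvCount.induct p s with
  | case1 x h ih =>
    intro hx hxt
    rw [pvCount, dif_pos h]
    have hx1 : x + 1 ≤ isq s - 10 * p := (key x hx).mp h.2
    exact ih (by omega) (by omega)
  | case2 x h =>
    intro hx hxt
    rw [pvCount, dif_neg h]
    rcases not_and_or.mp h with h1 | h2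
    · omega
    · have := (key x hx).not.mp h2
      omega

-- main correspondence: A's remainder loop = B's scaled-radicand loop,
-- linked by the invariant s = 100 p² + c
theorem pvMain :
    ∀ (k : Nat) (c p : Int), 0 ≤ c → 0 ≤ p →
      pvGoA k c p = pvGoB k (100 * p * p + c) p := by
  intro k
  induction k with
  | zero => intro c p _ _; rfl
  | succ n ih =>
    intro c p hc hp
    set S := 100 * p * p + c with hS
    have hS0 : 0 ≤ S := by positivity
    have hstepA : pvStepA p c = min 9 (isq S - 10 * p) := pvStepA_eq hp hc
    have hstepB : pvCount p S 0 = min 9 (isq S - 10 * p) := pvCount_eq hp (by omega)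
    set x := min 9 (isq S - 10 * p) with hx
    have hq := isq_nonneg S
    have h10 : 10 * p ≤ isq S := le_isq (by omega) (by nlinarith [isq_sq_le hS0])
    have hx0 : 0 ≤ x := by omega
    have hxle : 10 * p + x ≤ isq S := by omega
    have hy : x * (20 * p + x) ≤ c := by nlinarith [isq_sq_le hS0]
    show pvGoA (n + 1) c p = pvGoB (n + 1) S p
    rw [pvGoA, pvGoB]
    simp only [hstepA, hstepB]
    congr 1
    have harg : 100 * S = 100 * (10 * p + x) * (10 * p + x) + 100 * (c - x * (20 * p + x)) := by
      ring
    rw [ih (100 * (c - x * (20 * p + x))) (10 * p + x) (by nlinarith) (by omega), ← harg]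

-- ===== VERDICT (by name: the statement is the Claim_ definition above) =====
theorem find_sqrt_digits_spec : Claim_equal_find_sqrt_digits := by
  intro N n _ hpre
  unfold Spec_find_sqrt_digits find_sqrt_digits find_sqrt_digits_alt
  by_cases hn : 0 < n
  · have hN : 0 ≤ N := by
      cases hpre with
      | inl h => exact h
      | inr h => omega
    have := pvMain n.toNat N 0 hN le_rfl
    simpa using this
  · have : n.toNat = 0 := by omega
    rw [this]; rfl
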